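-- pv_equiv track=rewrite | github.com/weiyangzen/awesome_algorithms | Algorithms/计算机-排序算法-0007-希尔排序_(Shell_Sort)/demo.py | is_stable_on_sorted_records
-- ===== SOURCE A (Python) =====
-- from typing import Callable, List, Sequence, Tuple, TypeVar
--
-- def is_stable_on_sorted_records(sorted_records: Sequence[Tuple[int, int]]) -> bool:
--     """For equal values, original index order should stay non-decreasing."""
--     groups: dict[int, List[int]] = {}
--     for value, original_index in sorted_records:
--         groups.setdefault(value, []).append(original_index)
--     return all(
--         all(indices[i] <= indices[i + 1] for i in range(len(indices) - 1))
--         for indices in groups.values()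
--     )
-- ===== SOURCE B (Python) =====
-- def is_stable_on_sorted_records(sorted_records):
--     """For equal values, original index order should stay non-decreasing."""
--     last = {}
--     for value, original_index in sorted_records:
--         prev = last.get(value)
--         if prev is not None and original_index < prev:
--             return False
--         last[value] = original_index
--     return True
-- ===== Notes on version B (the rewrite author's own statement) =====
-- stated objective: simpler
-- what changed: Replaced the two-phase build-groups-then-check-each-group algorithm by a single fused pass keeping only the last index seen per value, with early exit on the first inversion.
import Mathlib
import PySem

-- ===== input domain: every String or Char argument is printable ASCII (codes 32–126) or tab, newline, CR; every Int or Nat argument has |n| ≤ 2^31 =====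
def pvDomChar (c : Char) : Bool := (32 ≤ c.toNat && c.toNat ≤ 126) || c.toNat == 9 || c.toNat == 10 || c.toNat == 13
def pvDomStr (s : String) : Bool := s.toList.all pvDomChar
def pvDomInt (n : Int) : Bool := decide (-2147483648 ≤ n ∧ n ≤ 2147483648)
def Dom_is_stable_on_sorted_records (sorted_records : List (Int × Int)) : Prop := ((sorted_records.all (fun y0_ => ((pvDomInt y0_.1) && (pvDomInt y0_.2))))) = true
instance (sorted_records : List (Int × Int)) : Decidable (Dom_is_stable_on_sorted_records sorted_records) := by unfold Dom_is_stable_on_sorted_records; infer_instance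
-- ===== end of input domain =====

-- B fuses A's two phases (build a dict of per-value index lists, then check every list
-- adjacent-nondecreasing) into one pass keeping only the last index per value,
-- returning False early on the first inversion. Objective: simpler.

-- ===== PORT A =====
-- inner generator: all(indices[i] <= indices[i+1] for i in range(len(indices) - 1))
def pvChainOk (indices : List Int) : Bool :=
  (List.range (indices.length - 1)).all (fun i => decide (indices.getD i 0 ≤ indices.getD (i + 1) 0))

def is_stable_on_sorted_records (sorted_records : List (Int × Int)) : Bool :=
  -- groups.setdefault(value, []).append(original_index)  ==  groups[v] = groups.get(v, []) + [i]
  let groups : PySem.Dict Int (List Int) :=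
    sorted_records.foldl (fun d p => d.modify p.1 [] (· ++ [p.2])) PySem.Dict.empty
  (groups.values).all pvChainOk

-- ===== PORT B =====
def pvBGo (last : PySem.Dict Int Int) : List (Int × Int) → Bool
  | [] => true
  | (value, original_index) :: rest =>
    match last.get? value with
    | some prev =>
      if original_index < prev then false
      else pvBGo (last.insert value original_index) rest
    | none => pvBGo (last.insert value original_index) rest

def is_stable_on_sorted_records_alt (sorted_records : List (Int × Int)) : Bool :=
  pvBGo PySem.Dict.empty sorted_records

-- ===== PRECONDITION & SPEC =====
def Spec_is_stable_on_sorted_records (sorted_records : List (Int × Int)) (out : Bool) : Prop := out = is_stable_on_sorted_records_alt sorted_records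
instance (sorted_records : List (Int × Int)) (out : Bool) : Decidable (Spec_is_stable_on_sorted_records sorted_records out) := by unfold Spec_is_stable_on_sorted_records; infer_instance

-- ===== CLAIM (what is proved, stated in full; the proofs are below) =====
def Claim_equal_is_stable_on_sorted_records : Prop := ∀ (sorted_records : List (Int × Int)), Dom_is_stable_on_sorted_records sorted_records → Spec_is_stable_on_sorted_records sorted_records (is_stable_on_sorted_records sorted_records)

-- ===== LEMMAS AND PROOFS =====

-- the per-value index list both programs implicitly work with
def pvGrp (rs : List (Int × Int)) (v : Int) : List Int :=
  (rs.filter (fun p => p.1 == v)).map (·.2)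

theorem pvChainOk_iff (l : List Int) :
    pvChainOk l = true ↔ List.IsChain (· ≤ ·) l := by
  rw [pvChainOk, List.isChain_iff_getElem, List.all_eq_true]
  constructor
  · intro h i hi
    have := h i (List.mem_range.mpr (by omega))
    simpa [List.getElem?_eq_getElem (show i < l.length by omega), List.getElem?_eq_getElem hi] using this
  · intro h i hi
    have hi' : i + 1 < l.length := by have := List.mem_range.mp hi; omega
    simpa [List.getElem?_eq_getElem (show i < l.length by omega), List.getElem?_eq_getElem hi'] using h i hi'

theorem pvGrp_cons_self (v i : Int) (rest : List (Int × Int)) :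
    pvGrp ((v, i) :: rest) v = i :: pvGrp rest v := by
  simp [pvGrp]

theorem pvGrp_cons_ne (v i w : Int) (rest : List (Int × Int)) (h : w ≠ v) :
    pvGrp ((v, i) :: rest) w = pvGrp rest w := by
  simp [pvGrp, Ne.symm h]

-- B's loop invariant: ok iff, for every value, (optional last index) ++ remaining group is a ≤-chain
theorem pvBGo_iff (rs : List (Int × Int)) : ∀ (last : PySem.Dict Int Int),
    pvBGo last rs = true ↔ ∀ v : Int, List.IsChain (· ≤ ·) ((last.get? v).toList ++ pvGrp rs v) := by
  induction rs with
  | nil =>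
    intro last
    simp only [pvBGo, true_iff]
    intro v
    cases last.get? v <;> simp [pvGrp]
  | cons p rest ih =>
    intro last
    obtain ⟨v, i⟩ := p
    have hstep : ∀ w : Int,
        ((last.insert v i).get? w).toList ++ pvGrp rest w =
          if w = v then i :: pvGrp rest w else (last.get? w).toList ++ pvGrp rest w := by
      intro w
      by_cases hw : w = v
      · subst hw; simp [PySem.Dict.get?_insert_self]
      · simp [PySem.Dict.get?_insert_of_ne last i hw, if_neg hw]
    have hgoal : ∀ w : Int,
        ((last.get? w).toList ++ pvGrp ((v, i) :: rest) w) =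
          if w = v then (last.get? v).toList ++ (i :: pvGrp rest v)
          else (last.get? w).toList ++ pvGrp rest w := by
      intro w
      by_cases hw : w = v
      · subst hw; rw [pvGrp_cons_self, if_pos rfl]
      · rw [pvGrp_cons_ne v i w rest hw, if_neg hw]
    cases hget : last.get? v with
    | some prev =>
      by_cases hlt : i < prev
      · simp only [pvBGo, hget, if_pos hlt, Bool.false_eq_true, false_iff]
        intro hall
        have hv := hall v
        rw [hgoal v, if_pos rfl, hget] at hv
        have := (List.isChain_cons_cons.mp (by simpa using hv)).1
        omega
      · simp only [pvBGo, hget, if_neg hlt]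
        rw [ih]
        constructor
        · intro hall w
          have hw := hall w
          rw [hstep w] at hw
          rw [hgoal w]
          by_cases h : w = v
          · subst h
            rw [if_pos rfl, hget]
            rw [if_pos rfl] at hw
            exact List.isChain_cons_cons.mpr ⟨by omega, by simpa using hw⟩
          · rw [if_neg h]; rwa [if_neg h] at hw
        · intro hall w
          have hw := hall w
          rw [hgoal w] at hw
          rw [hstep w]
          by_cases h : w = v
          · subst h
            rw [if_pos rfl]
            rw [if_pos rfl, hget] at hw
            exact (List.isChain_cons_cons.mp (by simpa using hw)).2
          · rw [if_neg h]; rwa [if_neg h] at hw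
    | none =>
      simp only [pvBGo, hget]
      rw [ih]
      constructor
      · intro hall w
        have hw := hall w
        rw [hstep w] at hw
        rw [hgoal w]
        by_cases h : w = v
        · subst h; rw [if_pos rfl, hget]; simpa using hw
        · rw [if_neg h]; rwa [if_neg h] at hw
      · intro hall w
        have hw := hall w
        rw [hgoal w] at hw
        rw [hstep w]
        by_cases h : w = v
        · subst h
          rw [if_pos rfl]
          rw [if_pos rfl, hget] at hw
          simpa using hw
        · rw [if_neg h]; rwa [if_neg h] at hw

theorem pvAlt_iff (rs : List (Int × Int)) :
    is_stable_on_sorted_records_alt rs = true ↔ ∀ v : Int, List.IsChain (· ≤ ·) (pvGrp rs v) := by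
  rw [is_stable_on_sorted_records_alt, pvBGo_iff]
  simp [PySem.Dict.get?_empty]

theorem pvA_iff (rs : List (Int × Int)) :
    is_stable_on_sorted_records rs = true ↔ ∀ v : Int, List.IsChain (· ≤ ·) (pvGrp rs v) := by
  rw [is_stable_on_sorted_records]
  set g : PySem.Dict Int (List Int) :=
    rs.foldl (fun d p => d.modify p.1 [] (· ++ [p.2])) PySem.Dict.empty with hg
  have hnd : g.keys.Nodup := by
    rw [hg]
    exact PySem.Dict.nodup_keys_foldl_modify_key rs (fun p => p.1) [] (fun d p => (· ++ [p.2])) _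
      PySem.Dict.nodup_keys_empty
  have hget : ∀ v : Int, g.getD v [] = pvGrp rs v := by
    intro v
    rw [hg]
    simpa [pvGrp] using
      PySem.Dict.getD_foldl_modify_append (l := rs) (d := PySem.Dict.empty) (c := v)
  have hkeys : ∀ v : Int, v ∉ g.keys → pvGrp rs v = [] := by
    intro v hv
    have : g.getD v [] = [] := by
      apply PySem.Dict.getD_of_not_contains
      rw [PySem.Dict.contains_eq_decide_mem_keys]
      simpa using hv
    rwa [hget v] at this
  rw [PySem.Dict.values_eq_map_keys g hnd []]
  simp only [List.all_map, List.all_eq_true, Function.comp]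
  constructor
  · intro h v
    by_cases hv : v ∈ g.keys
    · rw [← pvChainOk_iff, ← hget v]; exact h v hv
    · rw [hkeys v hv]; simp
  · intro h v _
    rw [hget v, pvChainOk_iff]
    exact h v

-- ===== VERDICT (by name: the statement is the Claim_ definition above) =====
theorem is_stable_on_sorted_records_spec : Claim_equal_is_stable_on_sorted_records := by
  intro rs _
  unfold Spec_is_stable_on_sorted_records
  rw [Bool.eq_iff_iff, pvA_iff, pvAlt_iff]
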